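-- pv_equiv track=rewrite | github.com/Dataming2020/Project-Code-and-Descriptions | fluctuation_of_homeAdv_and_correlation.py | get_right_number
-- ===== SOURCE A (Python) =====
-- def get_right_number(numbers, i):
--
--     if i >= len(numbers) - 1:
--         right = -99
--     else:
--         right = numbers[i + 1]
--         if right == -99:
--             right = get_right_number(numbers, i+1)
--     return right
-- ===== SOURCE B (Python) =====
-- def get_right_number(numbers, i):
--     for j in range(i + 1, len(numbers)):
--         if numbers[j] != -99:
--             return numbers[j]
--     return -99
-- ===== Notes on version B (the rewrite author's own statement) =====
-- stated objective: idiomatic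
-- what changed: Replaces the recursive self-call with a single forward for-loop over range(i+1, len(numbers)) that returns the first element different from -99, falling back to -99 on exhaustion.
import Mathlib
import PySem

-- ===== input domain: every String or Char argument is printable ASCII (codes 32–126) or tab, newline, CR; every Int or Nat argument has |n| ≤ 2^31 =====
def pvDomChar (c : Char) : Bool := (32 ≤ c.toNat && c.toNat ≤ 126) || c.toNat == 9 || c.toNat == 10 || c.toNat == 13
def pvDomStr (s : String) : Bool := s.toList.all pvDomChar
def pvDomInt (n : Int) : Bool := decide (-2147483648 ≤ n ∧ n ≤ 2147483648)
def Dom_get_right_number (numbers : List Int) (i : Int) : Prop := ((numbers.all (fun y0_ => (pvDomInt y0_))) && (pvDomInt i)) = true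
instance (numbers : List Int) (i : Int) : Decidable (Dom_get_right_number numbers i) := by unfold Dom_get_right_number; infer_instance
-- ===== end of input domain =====

-- B replaces A's recursion with an explicit forward loop over range(i+1, len(numbers)); idiomatic, same cost.


-- ===== PORT A =====
def get_right_number (numbers : List Int) (i : Int) : Int :=
  if i ≥ (numbers.length : Int) - 1 then -99
  else
    match PySem.List.pyGet? numbers (i + 1) with
    | none => 0  -- IndexError in Python; excluded by Pre_
    | some right => if right = -99 then get_right_number numbers (i + 1) else right
termination_by ((numbers.length : Int) - 1 - i).toNat
decreasing_by omega

-- ===== PORT B =====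
-- the for-loop of Source B, scanning the index list range(i+1, len(numbers))
def grnLoop (numbers : List Int) : List Int → Int
  | [] => -99
  | j :: rest =>
    match PySem.List.pyGet? numbers j with
    | none => 0  -- IndexError in Python; excluded by Pre_
    | some v => if v ≠ -99 then v else grnLoop numbers rest

def get_right_number_alt (numbers : List Int) (i : Int) : Int :=
  grnLoop numbers (PySem.List.pyRange (i + 1) numbers.length 1)

-- ===== PRECONDITION & SPEC =====
-- Pre_ excludes exactly the inputs where Python A raises IndexError: i < len-1 with i+1 below -len.
def Pre_get_right_number (numbers : List Int) (i : Int) : Prop :=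
  (numbers.length : Int) - 1 ≤ i ∨ -(numbers.length : Int) ≤ i + 1
instance (numbers : List Int) (i : Int) : Decidable (Pre_get_right_number numbers i) := by
  unfold Pre_get_right_number; infer_instance

def pvWitness_get_right_number : List Int × Int := ([1, -99, 2], 0)

def Spec_get_right_number (numbers : List Int) (i : Int) (out : Int) : Prop := out = get_right_number_alt numbers i
instance (numbers : List Int) (i : Int) (out : Int) : Decidable (Spec_get_right_number numbers i out) := by unfold Spec_get_right_number; infer_instance

-- ===== CLAIM (what is proved, stated in full; the proofs are below) =====
def Claim_equal_get_right_number : Prop := ∀ (numbers : List Int) (i : Int), Dom_get_right_number numbers i → Pre_get_right_number numbers i → Spec_get_right_number numbers i (get_right_number numbers i)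

-- ===== LEMMAS AND PROOFS =====

theorem grn_eq_alt (n : Nat) : ∀ (numbers : List Int) (i : Int),
    ((numbers.length : Int) - 1 - i).toNat = n → Pre_get_right_number numbers i →
    get_right_number numbers i = get_right_number_alt numbers i := by
  induction n using Nat.strong_induction_on with
  | _ n ih =>
    intro numbers i hn hpre
    by_cases hge : i ≥ (numbers.length : Int) - 1
    · rw [get_right_number]
      simp only [hge, if_pos]
      have hr : PySem.List.pyRange (i + 1) (numbers.length : Int) 1 = [] := by
        rw [PySem.List.pyRange_one]
        have : ((numbers.length : Int) - (i + 1)).toNat = 0 := by omega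
        simp [this]
      rw [get_right_number_alt, hr, grnLoop]
    · have hlt : i < (numbers.length : Int) - 1 := by omega
      have hin : PySem.Raise.InRange numbers.length (i + 1) := by
        constructor
        · rcases hpre with h | h
          · omega
          · exact h
        · omega
      obtain ⟨v, hv⟩ : ∃ v, PySem.List.pyGet? numbers (i + 1) = some v := by
        cases hg : PySem.List.pyGet? numbers (i + 1) with
        | none => exact absurd hin ((PySem.List.pyGet?_eq_none_iff ..).mp hg)
        | some v => exact ⟨v, rfl⟩
      have hrange : PySem.List.pyRange (i + 1) (numbers.length : Int) 1
          = (i + 1) :: PySem.List.pyRange (i + 1 + 1) (numbers.length : Int) 1 :=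
        PySem.List.pyRange_one_cons (by omega)
      rw [get_right_number]
      simp only [hge, if_neg, not_false_iff, hv]
      rw [get_right_number_alt, hrange, grnLoop, hv]
      by_cases h99 : v = -99
      · simp only [h99, if_pos, ite_not]
        have h1 : ((numbers.length : Int) - 1 - (i + 1)).toNat < n := by omega
        have h2 : Pre_get_right_number numbers (i + 1) := by
          unfold Pre_get_right_number at *; omega
        rw [ih _ h1 numbers (i + 1) rfl h2, get_right_number_alt]
      · simp [h99]

-- ===== VERDICT (by name: the statement is the Claim_ definition above) =====
theorem get_right_number_spec : Claim_equal_get_right_number := by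
  intro numbers i _ hpre
  exact grn_eq_alt _ numbers i rfl hpre
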